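-- pv_equiv track=rewrite | github.com/madboy/advent_2016 | day7_part2.py | split_address
-- ===== SOURCE A (Python) =====
-- def split_address(address: str) -> (list, list):
--     hypernet = False
--     supernet = []
--     hypernets = []
--     s = ""
--     for c in address:
--         if c == "[":
--             hypernet = True
--             supernet.append(s)
--             s = ""
--             continue
--         elif c == "]":
--             hypernet = False
--             hypernets.append(s)
--             s = ""
--             continue
--         s += c
--     if s:
--         supernet.append(s)
--     return (supernet, hypernets)
-- ===== SOURCE B (Python) =====
-- def split_address(address: str) -> (list, list):
--     # Tokenize by repeatedly jumping to the next bracket (slice-based),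
--     # instead of a char-by-char accumulator state machine.
--     supernet = []
--     hypernets = []
--     rest = address
--     while True:
--         i, d = next(((k, c) for k, c in enumerate(rest) if c in "[]"), (-1, ""))
--         if i < 0:
--             break
--         (supernet if d == "[" else hypernets).append(rest[:i])
--         rest = rest[i + 1:]
--     if rest:
--         supernet.append(rest)
--     return (supernet, hypernets)
-- ===== Notes on version B (the rewrite author's own statement) =====
-- stated objective: alternative
-- what changed: Replaced the char-by-char accumulator/flag state machine with a slice-based tokenizer that repeatedly jumps to the next bracket and routes the preceding slice by the bracket kind.
import Mathlib
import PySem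

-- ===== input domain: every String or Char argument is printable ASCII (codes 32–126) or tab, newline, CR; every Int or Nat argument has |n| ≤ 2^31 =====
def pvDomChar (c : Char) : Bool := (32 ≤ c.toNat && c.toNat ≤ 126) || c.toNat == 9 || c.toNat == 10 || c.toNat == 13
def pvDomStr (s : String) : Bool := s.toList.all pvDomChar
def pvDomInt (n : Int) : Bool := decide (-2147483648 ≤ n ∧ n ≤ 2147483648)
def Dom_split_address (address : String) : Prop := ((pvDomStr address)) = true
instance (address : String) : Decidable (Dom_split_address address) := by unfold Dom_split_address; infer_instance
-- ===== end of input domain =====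

-- B re-implements A's char-by-char accumulator/flag state machine as a slice-based
-- tokenizer that repeatedly jumps to the next bracket (objective: alternative, same cost).

-- ===== PORT A =====
-- A's loop state: (supernet, hypernets, current segment s); one step per character.
def pvStepA (st : List String × List String × List Char) (c : Char) :
    List String × List String × List Char :=
  if c = '[' then (st.1 ++ [String.ofList st.2.2], st.2.1, [])
  else if c = ']' then (st.1, st.2.1 ++ [String.ofList st.2.2], [])
  else (st.1, st.2.1, st.2.2 ++ [c])

def split_address (address : String) : List String × List String :=
  let fin := address.toList.foldl pvStepA ([], [], [])
  if fin.2.2.isEmpty then (fin.1, fin.2.1) else (fin.1 ++ [String.ofList fin.2.2], fin.2.1)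

-- ===== PORT B =====
-- index/char of the first bracket (python: next(((k,c) for k,c in enumerate(rest) if c in "[]"), (-1,"")))
def pvFirstBracket : List Char → Option (Nat × Char)
  | [] => none
  | c :: cs => if c = '[' || c = ']' then some (0, c)
               else (pvFirstBracket cs).map (fun p => (p.1 + 1, p.2))

theorem pvFirstBracket_lt : ∀ {cs : List Char} {i : Nat} {d : Char},
    pvFirstBracket cs = some (i, d) → i < cs.length := by
  intro cs
  induction cs with
  | nil => intro i d h; simp [pvFirstBracket] at h
  | cons c cs ih =>
    intro i d h
    simp only [pvFirstBracket] at h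
    split at h
    · simp only [Option.some.injEq, Prod.mk.injEq] at h
      simp only [List.length_cons]
      omega
    · simp only [Option.map_eq_some_iff] at h
      obtain ⟨⟨j, e⟩, hj, he⟩ := h
      have := ih hj
      simp only [Prod.mk.injEq] at he
      simp only [List.length_cons]
      omega

-- B's while loop: peel off the slice before the next bracket, route it by the bracket kind.
def pvAltGo (cs : List Char) (sup hyp : List String) : List String × List String :=
  match h : pvFirstBracket cs with
  | none => if cs.isEmpty then (sup, hyp) else (sup ++ [String.ofList cs], hyp)
  | some (i, d) =>
    if d = '[' then pvAltGo (cs.drop (i + 1)) (sup ++ [String.ofList (cs.take i)]) hyp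
    else pvAltGo (cs.drop (i + 1)) sup (hyp ++ [String.ofList (cs.take i)])
termination_by cs.length
decreasing_by
  all_goals
    have := pvFirstBracket_lt h
    simp only [List.length_drop]
    omega

def split_address_alt (address : String) : List String × List String :=
  pvAltGo address.toList [] []

-- ===== PRECONDITION & SPEC =====
def Spec_split_address (address : String) (out : List String × List String) : Prop := out = split_address_alt address
instance (address : String) (out : List String × List String) : Decidable (Spec_split_address address out) := by unfold Spec_split_address; infer_instance

-- ===== CLAIM (what is proved, stated in full; the proofs are below) =====
def Claim_equal_split_address : Prop := ∀ (address : String), Dom_split_address address → Spec_split_address address (split_address address)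

-- ===== LEMMAS AND PROOFS =====
def pvNoBr (s : List Char) : Bool := s.all (fun c => !(c = '[' || c = ']'))

theorem pvAltGo_eq_none (cs : List Char) (sup hyp : List String)
    (h : pvFirstBracket cs = none) :
    pvAltGo cs sup hyp = if cs.isEmpty then (sup, hyp) else (sup ++ [String.ofList cs], hyp) := by
  rw [pvAltGo.eq_def]
  split
  · rfl
  · rename_i i d heq
    rw [h] at heq
    cases heq

theorem pvAltGo_eq_some (cs : List Char) (sup hyp : List String) (i : Nat) (d : Char)
    (h : pvFirstBracket cs = some (i, d)) :
    pvAltGo cs sup hyp =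
      if d = '[' then pvAltGo (cs.drop (i + 1)) (sup ++ [String.ofList (cs.take i)]) hyp
      else pvAltGo (cs.drop (i + 1)) sup (hyp ++ [String.ofList (cs.take i)]) := by
  rw [pvAltGo.eq_def]
  split
  · rename_i heq
    rw [h] at heq
    cases heq
  · rename_i i' d' heq
    rw [h] at heq
    cases heq
    rfl

theorem pvFirstBracket_none {s : List Char} (h : pvNoBr s = true) :
    pvFirstBracket s = none := by
  induction s with
  | nil => rfl
  | cons c cs ih =>
    simp only [pvNoBr, List.all_cons, Bool.and_eq_true] at h
    have h1 : ¬(c = '[' || c = ']') = true := by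
      simpa using h.1
    simp only [pvFirstBracket, if_neg h1]
    rw [ih h.2]
    rfl

theorem pvFirstBracket_append {s : List Char} (h : pvNoBr s = true)
    {c : Char} (hc : (c = '[' || c = ']') = true) (cs : List Char) :
    pvFirstBracket (s ++ c :: cs) = some (s.length, c) := by
  induction s with
  | nil => simp [pvFirstBracket, hc]
  | cons a s ih =>
    simp only [pvNoBr, List.all_cons, Bool.and_eq_true] at h
    have h1 : ¬(a = '[' || a = ']') = true := by
      simpa using h.1
    simp only [List.cons_append, pvFirstBracket, if_neg h1, ih h.2, Option.map_some,
      List.length_cons]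

theorem pvDropLemma (s : List Char) (c : Char) (cs : List Char) :
    (s ++ c :: cs).drop (s.length + 1) = cs := by
  induction s with
  | nil => simp
  | cons a s ih => simpa using ih

theorem pvTakeLemma (s : List Char) (c : Char) (cs : List Char) :
    (s ++ c :: cs).take s.length = s := by
  induction s with
  | nil => simp
  | cons a s ih => simpa using ih

theorem pvMain (cs : List Char) : ∀ (s : List Char) (sup hyp : List String),
    pvNoBr s = true →
    (let fin := cs.foldl pvStepA (sup, hyp, s)
     if fin.2.2.isEmpty then (fin.1, fin.2.1) else (fin.1 ++ [String.ofList fin.2.2], fin.2.1))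
      = pvAltGo (s ++ cs) sup hyp := by
  induction cs with
  | nil =>
    intro s sup hyp hs
    rw [List.append_nil, pvAltGo_eq_none _ _ _ (pvFirstBracket_none hs)]
    simp
  | cons c cs ih =>
    intro s sup hyp hs
    by_cases h1 : c = '['
    · subst h1
      rw [pvAltGo_eq_some _ _ _ _ _ (pvFirstBracket_append hs (by simp) cs),
        pvDropLemma, pvTakeLemma]
      simp only [List.foldl_cons, pvStepA]
      simpa using ih [] (sup ++ [String.ofList s]) hyp rfl
    · by_cases h2 : c = ']'
      · subst h2
        rw [pvAltGo_eq_some _ _ _ _ _ (pvFirstBracket_append hs (by simp) cs),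
          pvDropLemma, pvTakeLemma, if_neg (show ¬(']' = '[') by decide)]
        simp only [List.foldl_cons, pvStepA, if_neg (show ¬(']' = '[') by decide)]
        simpa using ih [] sup (hyp ++ [String.ofList s]) rfl
      · have hs' : pvNoBr (s ++ [c]) = true := by
          simp only [pvNoBr, List.all_eq_true, List.mem_append, List.mem_singleton] at hs ⊢
          intro x hx
          rcases hx with hx | rfl
          · exact hs x hx
          · simp [h1, h2]
        have happ : s ++ c :: cs = (s ++ [c]) ++ cs := by simp
        rw [happ]
        simp only [List.foldl_cons, pvStepA, if_neg h1, if_neg h2]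
        exact ih (s ++ [c]) sup hyp hs'

-- ===== VERDICT (by name: the statement is the Claim_ definition above) =====
theorem split_address_spec : Claim_equal_split_address := by
  intro address _
  unfold Spec_split_address split_address split_address_alt
  simpa using pvMain address.toList [] [] [] rfl
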